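-- pv_equiv track=rewrite | github.com/Dionkaps/ML-song-recommendation-system | scripts/utilities/run_sample_pipeline_audit.py | should_ignore_directory
-- ===== SOURCE A (Python) =====
-- from typing import Dict, List, Sequence
--
-- COPY_IGNORE_NAMES = {
--     ".git",
--     ".venv",
--     "__pycache__",
--     "audio_files",
--     "output",
--     "node_modules",
-- }
--
-- def should_ignore_directory(relative_dir: str, names: Sequence[str]) -> List[str]:
--     ignored = [name for name in names if name in COPY_IGNORE_NAMES]
--     if relative_dir.startswith("docs/reports"):
--         if "run_logs" in names:
--             ignored.append("run_logs")
--     if relative_dir == "data":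
--         for name in (
--             "songs.csv",
--             "songs_with_merged_genres.csv",
--             "songs_schema_summary.json",
--             "_tmp_rebuilt_songs.csv",
--             "songs_genre_list.csv",
--             "unique_genres.csv",
--         ):
--             if name in names:
--                 ignored.append(name)
--     return sorted(set(ignored))
-- ===== SOURCE B (Python) =====
-- from typing import List, Sequence
--
-- # All names that can ever be ignored, pre-sorted, each tagged with the
-- # condition under which it applies.  The output is built directly in
-- # sorted order with no runtime sort and no set construction.
-- _SORTED_CANDIDATES = (
--     (".git", "base"),
--     (".venv", "base"),
--     ("__pycache__", "base"),
--     ("_tmp_rebuilt_songs.csv", "data"),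
--     ("audio_files", "base"),
--     ("node_modules", "base"),
--     ("output", "base"),
--     ("run_logs", "reports"),
--     ("songs.csv", "data"),
--     ("songs_genre_list.csv", "data"),
--     ("songs_schema_summary.json", "data"),
--     ("songs_with_merged_genres.csv", "data"),
--     ("unique_genres.csv", "data"),
-- )
--
-- def should_ignore_directory(relative_dir: str, names: Sequence[str]) -> List[str]:
--     result = []
--     for name, kind in _SORTED_CANDIDATES:
--         if name not in names:
--             continue
--         if (kind == "base"
--                 or (kind == "reports" and relative_dir.startswith("docs/reports"))
--                 or (kind == "data" and relative_dir == "data")):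
--             result.append(name)
--     return result
-- ===== Notes on version B (the rewrite author's own statement) =====
-- stated objective: alternative
-- what changed: B iterates a fixed pre-sorted tagged candidate list and emits each candidate that occurs in names and whose tag's condition holds, producing the result directly in sorted deduplicated order with no runtime sort and no set construction, instead of A's conditional append passes over names followed by sorted(set(...)).
import Mathlib
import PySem

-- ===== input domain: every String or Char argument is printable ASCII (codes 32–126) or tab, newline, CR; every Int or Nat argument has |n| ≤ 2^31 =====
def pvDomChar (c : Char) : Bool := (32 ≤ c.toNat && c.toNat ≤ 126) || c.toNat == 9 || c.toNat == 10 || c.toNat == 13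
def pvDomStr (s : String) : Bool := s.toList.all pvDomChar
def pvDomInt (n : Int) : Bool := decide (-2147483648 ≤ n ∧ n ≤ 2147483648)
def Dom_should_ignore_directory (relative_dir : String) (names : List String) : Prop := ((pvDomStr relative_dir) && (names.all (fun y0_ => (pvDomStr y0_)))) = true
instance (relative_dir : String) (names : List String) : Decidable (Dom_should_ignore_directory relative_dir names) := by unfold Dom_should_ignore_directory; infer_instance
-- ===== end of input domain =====

-- B scans a fixed pre-sorted tagged candidate list and emits matching entries in order
-- (no runtime sort, no set), instead of A's conditional append passes + sorted(set(...)).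
-- ===== PORT A =====
-- COPY_IGNORE_NAMES (module constant, a Python set)
def pvCopyIgnoreNames : PySem.Set String :=
  PySem.Set.ofList [".git", ".venv", "__pycache__", "audio_files", "output", "node_modules"]

-- the tuple of data filenames A iterates over
def pvDataNames : List String :=
  ["songs.csv", "songs_with_merged_genres.csv", "songs_schema_summary.json",
   "_tmp_rebuilt_songs.csv", "songs_genre_list.csv", "unique_genres.csv"]

def should_ignore_directory (relative_dir : String) (names : List String) : List String :=
  -- ignored = [name for name in names if name in COPY_IGNORE_NAMES]
  let ignored := names.filter (fun name => PySem.Set.contains pvCopyIgnoreNames name)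
  -- if relative_dir.startswith("docs/reports"): if "run_logs" in names: ignored.append("run_logs")
  let ignored :=
    if PySem.Str.startswith relative_dir "docs/reports" then
      if "run_logs" ∈ names then ignored ++ ["run_logs"] else ignored
    else ignored
  -- if relative_dir == "data": for name in (...): if name in names: ignored.append(name)
  let ignored :=
    if relative_dir = "data" then
      pvDataNames.foldl (fun acc name => if name ∈ names then acc ++ [name] else acc) ignored
    else ignored
  -- return sorted(set(ignored))
  PySem.List.sorted (PySem.Set.ofList ignored) (fun x => x) false

-- ===== PORT B =====
-- _SORTED_CANDIDATES: every possibly-ignored name, pre-sorted, tagged with its condition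
def pvSortedCandidates : List (String × String) :=
  [(".git", "base"), (".venv", "base"), ("__pycache__", "base"),
   ("_tmp_rebuilt_songs.csv", "data"), ("audio_files", "base"),
   ("node_modules", "base"), ("output", "base"), ("run_logs", "reports"),
   ("songs.csv", "data"), ("songs_genre_list.csv", "data"),
   ("songs_schema_summary.json", "data"), ("songs_with_merged_genres.csv", "data"),
   ("unique_genres.csv", "data")]

def should_ignore_directory_alt (relative_dir : String) (names : List String) : List String :=
  -- for name, kind in _SORTED_CANDIDATES: if name not in names: continue; if <cond>: result.append(name)
  pvSortedCandidates.foldl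
    (fun result p =>
      if p.1 ∉ names then result   -- continue
      else if p.2 = "base" ∨ (p.2 = "reports" ∧ PySem.Str.startswith relative_dir "docs/reports")
              ∨ (p.2 = "data" ∧ relative_dir = "data") then
        result ++ [p.1]
      else result)
    []

-- ===== PRECONDITION & SPEC =====
def Spec_should_ignore_directory (relative_dir : String) (names : List String) (out : List String) : Prop := out = should_ignore_directory_alt relative_dir names
instance (relative_dir : String) (names : List String) (out : List String) : Decidable (Spec_should_ignore_directory relative_dir names out) := by unfold Spec_should_ignore_directory; infer_instance

-- ===== CLAIM (what is proved, stated in full; the proofs are below) =====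
def Claim_equal_should_ignore_directory : Prop := ∀ (relative_dir : String) (names : List String), Dom_should_ignore_directory relative_dir names → Spec_should_ignore_directory relative_dir names (should_ignore_directory relative_dir names)

-- ===== LEMMAS AND PROOFS =====

-- B's loop as a filter-then-project over the candidate list
lemma pv_alt_eq_filter_map (relative_dir : String) (names : List String) :
    should_ignore_directory_alt relative_dir names
      = (pvSortedCandidates.filter
          (fun p => decide (p.1 ∈ names) &&
            decide (p.2 = "base" ∨ (p.2 = "reports" ∧ PySem.Str.startswith relative_dir "docs/reports")
              ∨ (p.2 = "data" ∧ relative_dir = "data")))).map Prod.fst := by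
  unfold should_ignore_directory_alt
  rw [show (fun (result : List String) (p : String × String) =>
      if p.1 ∉ names then result
      else if p.2 = "base" ∨ (p.2 = "reports" ∧ PySem.Str.startswith relative_dir "docs/reports")
              ∨ (p.2 = "data" ∧ relative_dir = "data") then result ++ [p.1]
      else result)
    = (fun result p =>
        if (decide (p.1 ∈ names) &&
            decide (p.2 = "base" ∨ (p.2 = "reports" ∧ PySem.Str.startswith relative_dir "docs/reports")
              ∨ (p.2 = "data" ∧ relative_dir = "data"))) = true then result ++ [p.1] else result)
    from by funext result p; by_cases h1 : p.1 ∈ names <;> simp [h1]]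
  simpa using PySem.List.foldl_append_if
    (fun p : String × String => decide (p.1 ∈ names) &&
      decide (p.2 = "base" ∨ (p.2 = "reports" ∧ PySem.Str.startswith relative_dir "docs/reports")
        ∨ (p.2 = "data" ∧ relative_dir = "data")))
    Prod.fst pvSortedCandidates []

-- B's projected filter is strictly increasing: a sublist of the sorted candidate names
lemma pv_candidates_pairwise : (pvSortedCandidates.map Prod.fst).Pairwise (· < ·) := by
  have h : ((pvSortedCandidates.map Prod.fst).map String.toList).Pairwise (· < ·) := by decide
  exact (List.pairwise_map.mp h).imp (fun hab => String.lt_iff_toList_lt.mpr hab)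

lemma pv_alt_pairwise (p : String × String → Bool) :
    ((pvSortedCandidates.filter p).map Prod.fst).Pairwise (fun a b : String => a < b) :=
  List.Pairwise.sublist ((List.filter_sublist).map Prod.fst) pv_candidates_pairwise

-- A's data-branch loop as append-then-filter
lemma pv_foldl_data (names l acc : List String) :
    l.foldl (fun acc name => if name ∈ names then acc ++ [name] else acc) acc
      = acc ++ l.filter (fun name => decide (name ∈ names)) := by
  simpa using PySem.List.foldl_append_if_eq_filter (fun name => decide (name ∈ names)) l acc

theorem should_ignore_directory_spec : Claim_equal_should_ignore_directory := by
  intro rd names _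
  unfold Spec_should_ignore_directory
  rw [pv_alt_eq_filter_map]
  unfold should_ignore_directory
  apply PySem.List.sorted_eq_of_perm_of_pairwise_lt
  · -- permutation: both sides nodup with the same membership
    apply (List.perm_ext_iff_of_nodup ?_ (PySem.Set.nodup_ofList _)).mpr
    · intro x
      split_ifs <;>
        (try rw [pv_foldl_data]) <;>
        simp only [PySem.Set.mem_ofList, List.mem_append, List.mem_filter, List.mem_map,
          PySem.Set.contains_iff, pvCopyIgnoreNames, pvDataNames, pvSortedCandidates,
          PySem.Set.mem_ofList, List.mem_cons, List.not_mem_nil, or_false,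
          decide_eq_true_eq, Bool.and_eq_true] <;>
        aesop
    · -- B's output has no duplicates: it is strictly increasing
      exact (pv_alt_pairwise _).nodup
  · -- B's output is strictly increasing (sublist of the sorted candidate names)
    exact pv_alt_pairwise _

-- ===== VERDICT (by name: the statement is the Claim_ definition above) =====
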